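-- pv_equiv track=rewrite | github.com/DNLINYJ/LighterWrapper | LighterWrapper.py | _order_matches_identifier
-- ===== SOURCE A (Python) =====
-- from typing import Dict, Optional
--
-- def _order_matches_identifier(
--     order: dict,
--     order_index: Optional[int],
--     order_id: Optional[int],
--     client_order_index: Optional[int],
-- ) -> bool:
--     def _matches(keys, target):
--         if target is None:
--             return False
--         for key in keys:
--             if key in order and order[key] is not None:
--                 if str(order[key]) == str(target):
--                     return True
--         return False
--
--     if _matches(("order_index", "orderIndex", "order_id", "orderId", "id"), order_index):
--         return True
--     if _matches(("order_id", "orderId", "id", "order_index", "orderIndex"), order_id):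
--         return True
--     if _matches(
--         ("client_order_index", "clientOrderIndex", "client_order_id", "clientOrderId"),
--         client_order_index,
--     ):
--         return True
--     return False
-- ===== SOURCE B (Python) =====
-- from typing import Dict, Optional
--
-- _G1 = {"order_index", "orderIndex", "order_id", "orderId", "id"}
-- _G2 = {"client_order_index", "clientOrderIndex", "client_order_id", "clientOrderId"}
--
-- def _order_matches_identifier(
--     order: dict,
--     order_index: Optional[int],
--     order_id: Optional[int],
--     client_order_index: Optional[int],
-- ) -> bool:
--     # Precompute the string forms of the targets once, then make a single
--     # pass over the keys actually present in the order dict.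
--     t1 = None if order_index is None else str(order_index)
--     t2 = None if order_id is None else str(order_id)
--     t3 = None if client_order_index is None else str(client_order_index)
--     for key, value in order.items():
--         if value is None:
--             continue
--         s = str(value)
--         if key in _G1:
--             if s == t1 or s == t2:
--                 return True
--         elif key in _G2:
--             if s == t3:
--                 return True
--     return False
-- ===== Notes on version B (the rewrite author's own statement) =====
-- stated objective: alternative
-- what changed: Instead of three fixed-key-tuple scans each probing the dict per key, B precomputes the target strings once and makes a single pass over the dict's own items, classifying each present key into one of two key-groups.
import Mathlib
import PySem

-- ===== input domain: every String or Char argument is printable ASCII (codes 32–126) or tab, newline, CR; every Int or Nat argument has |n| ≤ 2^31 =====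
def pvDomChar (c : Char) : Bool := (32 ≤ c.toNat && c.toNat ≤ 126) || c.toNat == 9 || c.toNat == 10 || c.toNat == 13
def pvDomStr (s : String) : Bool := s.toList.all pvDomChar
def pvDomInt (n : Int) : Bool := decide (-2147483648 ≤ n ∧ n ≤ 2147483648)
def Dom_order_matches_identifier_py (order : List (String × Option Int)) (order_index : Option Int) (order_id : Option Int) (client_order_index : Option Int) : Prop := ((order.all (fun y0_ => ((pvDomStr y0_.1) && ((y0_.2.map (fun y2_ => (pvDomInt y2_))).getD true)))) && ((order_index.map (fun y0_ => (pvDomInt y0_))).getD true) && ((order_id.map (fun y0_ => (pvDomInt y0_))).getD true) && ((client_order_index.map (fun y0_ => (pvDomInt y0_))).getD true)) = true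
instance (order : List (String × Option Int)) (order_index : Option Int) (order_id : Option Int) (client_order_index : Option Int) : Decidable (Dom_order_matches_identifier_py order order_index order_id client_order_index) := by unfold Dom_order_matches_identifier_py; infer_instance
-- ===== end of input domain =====

-- B replaces A's three fixed-key-tuple scans of the dict by one pass over the
-- dict's own items against precomputed target strings (alternative decomposition).


-- ===== PORT A =====
-- the inner helper `_matches(keys, target)`
def pvMatches (order : List (String × Option Int)) (keys : List String) (target : Option Int) : Bool :=
  match target with
  | none => false
  | some t =>
    keys.any (fun key =>
      match (PySem.Dict.mk order).get? key with
      | some (some v) => PySem.Int.toStr v == PySem.Int.toStr t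
      | _ => false)

def order_matches_identifier_py (order : List (String × Option Int)) (order_index : Option Int) (order_id : Option Int) (client_order_index : Option Int) : Bool :=
  if pvMatches order ["order_index", "orderIndex", "order_id", "orderId", "id"] order_index then true
  else if pvMatches order ["order_id", "orderId", "id", "order_index", "orderIndex"] order_id then true
  else if pvMatches order ["client_order_index", "clientOrderIndex", "client_order_id", "clientOrderId"] client_order_index then true
  else false

-- ===== PORT B =====
def pvG1 : List String := ["order_index", "orderIndex", "order_id", "orderId", "id"]
def pvG2 : List String := ["client_order_index", "clientOrderIndex", "client_order_id", "clientOrderId"]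

-- the for-loop over order.items()
def pvAltLoop (t1 t2 t3 : Option String) : List (String × Option Int) → Bool
  | [] => false
  | (key, value) :: rest =>
    match value with
    | none => pvAltLoop t1 t2 t3 rest
    | some x =>
      let s := PySem.Int.toStr x
      if key ∈ pvG1 then
        if some s == t1 || some s == t2 then true else pvAltLoop t1 t2 t3 rest
      else if key ∈ pvG2 then
        if some s == t3 then true else pvAltLoop t1 t2 t3 rest
      else pvAltLoop t1 t2 t3 rest

def order_matches_identifier_py_alt (order : List (String × Option Int)) (order_index : Option Int) (order_id : Option Int) (client_order_index : Option Int) : Bool :=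
  pvAltLoop (order_index.map PySem.Int.toStr) (order_id.map PySem.Int.toStr)
    (client_order_index.map PySem.Int.toStr) order

-- ===== PRECONDITION & SPEC =====
-- Pre_ excludes association lists with duplicate keys: such lists do not represent any
-- Python dict (dict construction overwrites duplicates), so neither port's reading of them is canonical.
def Pre_order_matches_identifier_py (order : List (String × Option Int)) (order_index : Option Int) (order_id : Option Int) (client_order_index : Option Int) : Prop :=
  (order.map Prod.fst).Nodup
instance (order : List (String × Option Int)) (order_index : Option Int) (order_id : Option Int) (client_order_index : Option Int) : Decidable (Pre_order_matches_identifier_py order order_index order_id client_order_index) := by unfold Pre_order_matches_identifier_py; infer_instance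

def pvWitness_order_matches_identifier_py : (List (String × Option Int)) × Option Int × Option Int × Option Int :=
  ([("order_id", some 7), ("id", none), ("foo", some 3)], some 7, none, some 5)

def Spec_order_matches_identifier_py (order : List (String × Option Int)) (order_index : Option Int) (order_id : Option Int) (client_order_index : Option Int) (out : Bool) : Prop := out = order_matches_identifier_py_alt order order_index order_id client_order_index
instance (order : List (String × Option Int)) (order_index : Option Int) (order_id : Option Int) (client_order_index : Option Int) (out : Bool) : Decidable (Spec_order_matches_identifier_py order order_index order_id client_order_index out) := by unfold Spec_order_matches_identifier_py; infer_instance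

-- ===== CLAIM (what is proved, stated in full; the proofs are below) =====
def Claim_equal_order_matches_identifier_py : Prop := ∀ (order : List (String × Option Int)) (order_index : Option Int) (order_id : Option Int) (client_order_index : Option Int), Dom_order_matches_identifier_py order order_index order_id client_order_index → Pre_order_matches_identifier_py order order_index order_id client_order_index → Spec_order_matches_identifier_py order order_index order_id client_order_index (order_matches_identifier_py order order_index order_id client_order_index)

-- ===== LEMMAS AND PROOFS =====

-- B's loop is an `any` over the pairs
lemma pvAltLoop_eq_any (t1 t2 t3 : Option String) (order : List (String × Option Int)) :
    pvAltLoop t1 t2 t3 order = order.any (fun kv =>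
      match kv.2 with
      | none => false
      | some x =>
        let s := PySem.Int.toStr x
        if kv.1 ∈ pvG1 then some s == t1 || some s == t2
        else if kv.1 ∈ pvG2 then some s == t3
        else false) := by
  induction order with
  | nil => rfl
  | cons kv rest ih =>
    obtain ⟨key, value⟩ := kv
    cases value with
    | none => simpa [pvAltLoop] using ih
    | some x =>
      simp only [pvAltLoop, List.any_cons]
      split_ifs <;> simp_all

-- first-match lookup in a nodup association list is membership
lemma get?_mk_eq_some_iff (order : List (String × Option Int)) (hnd : (order.map Prod.fst).Nodup)
    (k : String) (w : Option Int) :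
    (PySem.Dict.mk order).get? k = some w ↔ (k, w) ∈ order := by
  induction order with
  | nil => simp [PySem.Dict.get?]
  | cons kv rest ih =>
    obtain ⟨k', w'⟩ := kv
    simp only [List.map_cons, List.nodup_cons] at hnd
    rw [PySem.Dict.get?_mk_cons]
    by_cases hk : k' = k
    · subst hk
      simp only [beq_self_eq_true, List.mem_cons]
      constructor
      · rintro h; exact Or.inl (by simpa using h.symm)
      · rintro (h | h)
        · simp [Prod.ext_iff] at h; simp [h]
        · exact absurd (List.mem_map_of_mem (f := Prod.fst) h) (by simpa using hnd.1)
    · simp only [beq_iff_eq, if_neg hk, List.mem_cons]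
      rw [ih hnd.2]
      constructor
      · exact Or.inr
      · rintro (h | h)
        · exact absurd (congrArg Prod.fst h).symm hk
        · exact h

lemma pvMatches_iff (order : List (String × Option Int)) (hnd : (order.map Prod.fst).Nodup)
    (keys : List String) (t : Int) :
    pvMatches order keys (some t) = true ↔
      ∃ k v, (k, some v) ∈ order ∧ k ∈ keys ∧ PySem.Int.toStr v = PySem.Int.toStr t := by
  simp only [pvMatches, List.any_eq_true]
  constructor
  · rintro ⟨k, hk, hmatch⟩
    cases hg : (PySem.Dict.mk order).get? k with
    | none => simp [hg] at hmatch
    | some w =>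
      cases w with
      | none => simp [hg] at hmatch
      | some v =>
        rw [hg] at hmatch
        exact ⟨k, v, (get?_mk_eq_some_iff order hnd k (some v)).1 hg, hk, by simpa using hmatch⟩
  · rintro ⟨k, v, hmem, hk, heq⟩
    refine ⟨k, hk, ?_⟩
    rw [(get?_mk_eq_some_iff order hnd k (some v)).2 hmem]
    simpa using heq

-- the two 5-key tuples of A contain the same keys
lemma hK2_mem (k : String) :
    k ∈ (["order_id", "orderId", "id", "order_index", "orderIndex"] : List String) ↔ k ∈ pvG1 := by
  simp only [pvG1, List.mem_cons, List.not_mem_nil, or_false]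
  tauto

lemma g_disjoint (k : String) (h : k ∈ pvG2) : k ∉ pvG1 := by
  fin_cases h <;> decide

-- ===== VERDICT (by name: the statement is the Claim_ definition above) =====
theorem order_matches_identifier_py_spec : Claim_equal_order_matches_identifier_py := by
  intro order oi oid coi _ hpre
  unfold Spec_order_matches_identifier_py
  unfold order_matches_identifier_py order_matches_identifier_py_alt
  rw [pvAltLoop_eq_any]
  have hchain : ∀ a b c : Bool,
      (if a then true else if b then true else if c then true else false) = (a || b || c) := by decide
  rw [hchain]
  have hb : ∀ a b : Bool, (a = true ↔ b = true) → a = b := by decide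
  apply hb
  rw [Bool.or_eq_true, Bool.or_eq_true, List.any_eq_true]
  constructor
  · rintro ((h | h) | h)
    · rcases oi with _ | i
      · simp [pvMatches] at h
      · obtain ⟨k, v, hmem, hk, heq⟩ := (pvMatches_iff order hpre _ i).1 h
        refine ⟨(k, some v), hmem, ?_⟩
        have hg1 : k ∈ pvG1 := hk
        simp [hg1, heq]
    · rcases oid with _ | j
      · simp [pvMatches] at h
      · obtain ⟨k, v, hmem, hk, heq⟩ := (pvMatches_iff order hpre _ j).1 h
        refine ⟨(k, some v), hmem, ?_⟩
        have hg1 : k ∈ pvG1 := (hK2_mem k).1 hk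
        simp [hg1, heq]
    · rcases coi with _ | c
      · simp [pvMatches] at h
      · obtain ⟨k, v, hmem, hk, heq⟩ := (pvMatches_iff order hpre _ c).1 h
        refine ⟨(k, some v), hmem, ?_⟩
        have hg2 : k ∈ pvG2 := hk
        simp [g_disjoint k hg2, hg2, heq]
  · rintro ⟨⟨k, v⟩, hmem, hf⟩
    rcases v with _ | x
    · simp at hf
    dsimp only at hf
    by_cases hg1 : k ∈ pvG1
    · rw [if_pos hg1, Bool.or_eq_true] at hf
      rcases hf with h | h
      · rcases oi with _ | i
        · simp at h
        · refine Or.inl (Or.inl ((pvMatches_iff order hpre _ i).2 ⟨k, x, hmem, hg1, ?_⟩))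
          simpa using h
      · rcases oid with _ | j
        · simp at h
        · refine Or.inl (Or.inr ((pvMatches_iff order hpre _ j).2 ⟨k, x, hmem, (hK2_mem k).2 hg1, ?_⟩))
          simpa using h
    · by_cases hg2 : k ∈ pvG2
      · rw [if_neg hg1, if_pos hg2] at hf
        rcases coi with _ | c
        · simp at hf
        · refine Or.inr ((pvMatches_iff order hpre _ c).2 ⟨k, x, hmem, hg2, ?_⟩)
          simpa using hf
      · simp [hg1, hg2] at hf
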